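-- pv_equiv track=rewrite | github.com/TiagoJRAlmeida/entity-resolution-port-logistics | src/clustering/clustering.py | create_ground_truth_synonym_clusters
-- ===== SOURCE A (Python) =====
-- from collections import defaultdict
--
-- def create_ground_truth_synonym_clusters(synonyms_map):
--     # 1. Map every ID to the set of names that mention it
--     id_to_names = defaultdict(set)
--     name_to_ids = defaultdict(set)
--
--     for variant, canon_map in synonyms_map.items():
--         for canon, ids in canon_map.items():
--             for _id in ids:
--                 id_to_names[_id].update([variant, canon])
--                 name_to_ids[variant].add(_id)
--                 name_to_ids[canon].add(_id)
--
--     # 2. Union-find to merge IDs that share a name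
--     parent = {}
--
--     def find(x):
--         while parent[x] != x:
--             parent[x] = parent[parent[x]]
--             x = parent[x]
--         return x
--
--     def union(a, b):
--         ra, rb = find(a), find(b)
--         if ra != rb:
--             parent[rb] = ra
--
--     # initialize each ID as its own parent
--     for _id in id_to_names:
--         parent[_id] = _id
--
--     # union all IDs that share any name
--     for name, ids in name_to_ids.items():
--         ids = list(ids)
--         for i in range(1, len(ids)):
--             union(ids[0], ids[i])
--
--     # 3. Gather clusters by representative ID
--     rep_to_names = defaultdict(set)
--     for _id, names in id_to_names.items():
--         rep = find(_id)
--         rep_to_names[rep].update(names)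
--
--     # 4. Format result
--     clusters = [sorted(names) for names in rep_to_names.values()]
--
--     return clusters
-- ===== SOURCE B (Python) =====
-- def create_ground_truth_synonym_clusters(synonyms_map):
--     # 1. Flatten the nested mapping into (variant, canon, id) triples, then
--     #    build the two lookup tables in two plain passes.
--     triples = [(variant, canon, _id)
--                for variant, canon_map in synonyms_map.items()
--                for canon, ids in canon_map.items()
--                for _id in ids]
--
--     id_to_names = {}
--     for variant, canon, _id in triples:
--         id_to_names.setdefault(_id, set()).update((variant, canon))
--
--     name_to_ids = {}
--     for variant, canon, _id in triples:
--         name_to_ids.setdefault(variant, set()).add(_id)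
--         name_to_ids.setdefault(canon, set()).add(_id)
--
--     # 2. Direct cluster-label table instead of union-find: every ID starts in
--     #    its own cluster; IDs sharing a name get their labels unified by
--     #    rewriting one label to the other across the whole table.
--     label = {_id: i for i, _id in enumerate(id_to_names)}
--     for ids in name_to_ids.values():
--         ids = list(ids)
--         target = label[ids[0]]
--         for other in ids[1:]:
--             old = label[other]
--             if old != target:
--                 for k, v in label.items():
--                     if v == old:
--                         label[k] = target
--
--     # 3. Gather the names of each cluster, keyed by the cluster label.
--     clusters = {}
--     for _id, names in id_to_names.items():
--         clusters.setdefault(label[_id], set()).update(names)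
--
--     # 4. Format result
--     return [sorted(names) for names in clusters.values()]
-- ===== Notes on version B (the rewrite author's own statement) =====
-- stated objective: simpler
-- what changed: The union-find forest (parent pointers, find with path halving, union) is replaced by a flat id-to-cluster-label table whose labels are unified by rewriting one label to the other across the table, and the nested map-building loops are flattened into a triple list consumed by two plain passes; B trades union-find's near-linear merging for the plainer full-table relabel.
import Mathlib
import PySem

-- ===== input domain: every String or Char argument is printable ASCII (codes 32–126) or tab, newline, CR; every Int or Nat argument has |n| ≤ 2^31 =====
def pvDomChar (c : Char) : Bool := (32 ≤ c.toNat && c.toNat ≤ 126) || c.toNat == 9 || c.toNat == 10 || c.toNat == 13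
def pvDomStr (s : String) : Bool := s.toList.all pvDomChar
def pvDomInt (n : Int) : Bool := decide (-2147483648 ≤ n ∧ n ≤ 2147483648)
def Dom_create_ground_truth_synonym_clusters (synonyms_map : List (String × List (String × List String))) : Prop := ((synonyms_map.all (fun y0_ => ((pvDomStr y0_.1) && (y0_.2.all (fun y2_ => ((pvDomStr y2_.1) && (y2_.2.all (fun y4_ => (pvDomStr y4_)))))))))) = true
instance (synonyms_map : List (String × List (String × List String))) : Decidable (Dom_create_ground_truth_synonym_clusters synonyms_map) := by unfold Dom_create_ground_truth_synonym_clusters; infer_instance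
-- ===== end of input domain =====

-- B replaces A's union-find forest (find with path halving + union) by a flat id→cluster-label
-- table unified by full-table label rewrites, and flattens the nested map-building loops into a
-- triple list consumed by two plain passes (objective: simpler; same return value).
-- Python set iteration order is not observable in the result (the emitted clusters and their order
-- depend only on the partition and on dict insertion order), so Sets are ported in insertion order.

-- ===== PORT A =====
-- find(x): while parent[x] != x: parent[x] = parent[parent[x]]; x = parent[x]; return x
-- (fuel parent.size+1 always suffices: parent stays an acyclic forest — proved below;
--  parent[x] is ported as getD x x, exact because every x looked up is a key)
def pvFindA (p : PySem.Dict String String) (x : String) : Nat → (String × PySem.Dict String String)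
  | 0 => (x, p)
  | n+1 =>
    if p.getD x x ≠ x then
      pvFindA (p.insert x (p.getD (p.getD x x) (p.getD x x))) (p.getD (p.getD x x) (p.getD x x)) n
    else (x, p)

-- union(a, b): ra, rb = find(a), find(b); if ra != rb: parent[rb] = ra
def pvUnionA (p : PySem.Dict String String) (a b : String) : PySem.Dict String String :=
  let fa := pvFindA p a (p.size + 1)
  let fb := pvFindA fa.2 b (fa.2.size + 1)
  if fa.1 ≠ fb.1 then fb.2.insert fb.1 fa.1 else fb.2

def create_ground_truth_synonym_clusters (synonyms_map : List (String × List (String × List String))) : List (List String) :=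
  -- 1. defaultdict(set) loops over the nested dicts, both maps built in one pass
  let maps := synonyms_map.foldl (fun (m : PySem.Dict String (PySem.Set String) × PySem.Dict String (PySem.Set String)) vc =>
      vc.2.foldl (fun m ci =>
        ci.2.foldl (fun m _id =>
          ( m.1.modify _id PySem.Set.empty (fun s => PySem.Set.update s [vc.1, ci.1]),
            (m.2.modify vc.1 PySem.Set.empty (fun s => PySem.Set.add s _id)).modify ci.1
              PySem.Set.empty (fun s => PySem.Set.add s _id) )) m) m)
    (PySem.Dict.empty, PySem.Dict.empty)
  let id_to_names := maps.1
  let name_to_ids := maps.2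
  -- 2. union-find: initialize each ID as its own parent, union all IDs sharing a name
  let parent : PySem.Dict String String :=
    id_to_names.keys.foldl (fun p i => p.insert i i) PySem.Dict.empty
  let parent := name_to_ids.items.foldl (fun p kv =>
      (PySem.List.pyRange 1 (PySem.List.len kv.2) 1).foldl
        (fun p i => pvUnionA p (PySem.List.pyGetD kv.2 0 "") (PySem.List.pyGetD kv.2 i "")) p) parent
  -- 3. gather clusters by representative ID (find keeps mutating parent)
  let final := id_to_names.items.foldl
      (fun (st : PySem.Dict String String × PySem.Dict String (PySem.Set String)) kv =>
        let f := pvFindA st.1 kv.1 (st.1.size + 1)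
        (f.2, st.2.modify f.1 PySem.Set.empty (fun s => PySem.Set.update s kv.2))) (parent, PySem.Dict.empty)
  -- 4. format result
  final.2.values.map (fun names => PySem.List.sorted names (fun x => x) false)

-- ===== PORT B =====
def create_ground_truth_synonym_clusters_alt (synonyms_map : List (String × List (String × List String))) : List (List String) :=
  -- 1. flatten to (variant, canon, id) triples, then two plain passes
  let triples := synonyms_map.flatMap (fun vc => vc.2.flatMap (fun ci => ci.2.map (fun _id => (vc.1, ci.1, _id))))
  let id_to_names := triples.foldl (fun d t =>
      d.modify t.2.2 PySem.Set.empty (fun s => PySem.Set.update s [t.1, t.2.1])) PySem.Dict.empty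
  let name_to_ids := triples.foldl (fun d t =>
      (d.modify t.1 PySem.Set.empty (fun s => PySem.Set.add s t.2.2)).modify t.2.1
        PySem.Set.empty (fun s => PySem.Set.add s t.2.2)) PySem.Dict.empty
  -- 2. label table: every ID its own cluster, labels unified by full-table rewrites
  let label : PySem.Dict String Int :=
    (PySem.List.enumerate id_to_names.keys 0).foldl (fun d p => d.insert p.2 p.1) PySem.Dict.empty
  let label := name_to_ids.values.foldl (fun lab ids =>
      let target := lab.getD (PySem.List.pyGetD ids 0 "") 0      -- label[ids[0]] (always a key)
      (PySem.List.slice ids (some 1) none).foldl (fun lab other =>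
        let old := lab.getD other 0                              -- label[other] (always a key)
        if old ≠ target then
          -- for k, v in label.items(): if v == old: label[k] = target  (keys and order unchanged)
          PySem.Dict.mk (lab.items.map (fun kv => if kv.2 = old then (kv.1, target) else kv))
        else lab) lab) label
  -- 3. gather the names of each cluster, keyed by the cluster label
  let clusters := id_to_names.items.foldl (fun d kv =>
      d.modify (label.getD kv.1 0) PySem.Set.empty (fun s => PySem.Set.update s kv.2)) PySem.Dict.empty
  -- 4. format result
  clusters.values.map (fun names => PySem.List.sorted names (fun x => x) false)

-- ===== PRECONDITION & SPEC =====
def Spec_create_ground_truth_synonym_clusters (synonyms_map : List (String × List (String × List String))) (out : List (List String)) : Prop := out = create_ground_truth_synonym_clusters_alt synonyms_map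
instance (synonyms_map : List (String × List (String × List String))) (out : List (List String)) : Decidable (Spec_create_ground_truth_synonym_clusters synonyms_map out) := by unfold Spec_create_ground_truth_synonym_clusters; infer_instance

-- ===== CLAIM (what is proved, stated in full; the proofs are below) =====
def Claim_equal_create_ground_truth_synonym_clusters : Prop := ∀ (synonyms_map : List (String × List (String × List String))), Dom_create_ground_truth_synonym_clusters synonyms_map → Spec_create_ground_truth_synonym_clusters synonyms_map (create_ground_truth_synonym_clusters synonyms_map)

-- ===== LEMMAS AND PROOFS =====

-- parent[x] as a total function; Root p x follows parent pointers (fuel p.size is enough on forests)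
def pvPstep (p : PySem.Dict String String) (x : String) : String := p.getD x x

def pvRootN (p : PySem.Dict String String) : Nat → String → String
  | 0, x => x
  | n+1, x => if pvPstep p x = x then x else pvRootN p n (pvPstep p x)

def pvRoot (p : PySem.Dict String String) (x : String) : String := pvRootN p p.size x

def pvDistN (p : PySem.Dict String String) : Nat → String → Nat
  | 0, _ => 0
  | n+1, x => if pvPstep p x = x then 0 else pvDistN p n (pvPstep p x) + 1

def pvDist (p : PySem.Dict String String) (x : String) : Nat := pvDistN p p.size x

-- parent is an acyclic forest, witnessed by a rank d strictly decreasing along pointers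
def pvWF (p : PySem.Dict String String) (d : String → Nat) : Prop :=
  ∀ x, p.contains x = true →
    p.contains (pvPstep p x) = true ∧ (pvPstep p x = x ∨ d (pvPstep p x) < d x)

theorem pv_get?_none {κ ν : Type} [BEq κ] (d : PySem.Dict κ ν) (k : κ)
    (h : d.contains k = false) : d.get? k = none := by
  simp only [PySem.Dict.contains, List.any_eq_false] at h
  simp only [PySem.Dict.get?, Option.map_eq_none_iff, List.find?_eq_none]
  intro a ha
  exact h a ha

theorem pvRootN_fix (p : PySem.Dict String String) (x : String) (h : pvPstep p x = x) :
    ∀ n, pvRootN p n x = x := by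
  intro n; cases n <;> simp [pvRootN, h]

theorem pvPstep_not_contains (p : PySem.Dict String String) (x : String)
    (h : p.contains x = false) : pvPstep p x = x := by
  simp [pvPstep, PySem.Dict.getD, pv_get?_none p x h]

theorem pvRoot_not_contains (p : PySem.Dict String String) (x : String)
    (h : p.contains x = false) : pvRoot p x = x :=
  pvRootN_fix p x (pvPstep_not_contains p x h) _

theorem pv_chain {p : PySem.Dict String String} {d : String → Nat} (h : pvWF p d) :
    ∀ x, p.contains x = true →
    ∃ (c : List String) (r : String), (x::c).Nodup ∧
      (∀ y ∈ x::c, p.contains y = true ∧ d y ≤ d x) ∧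
      p.contains r = true ∧ pvPstep p r = r ∧
      (∀ n, (x::c).length ≤ n → pvRootN p n x = r ∧ pvDistN p n x = c.length) := by
  suffices H : ∀ m x, d x ≤ m → p.contains x = true →
      ∃ (c : List String) (r : String), (x::c).Nodup ∧
        (∀ y ∈ x::c, p.contains y = true ∧ d y ≤ d x) ∧
        p.contains r = true ∧ pvPstep p r = r ∧
        (∀ n, (x::c).length ≤ n → pvRootN p n x = r ∧ pvDistN p n x = c.length) by
    intro x hx; exact H (d x) x le_rfl hx
  intro m
  induction m with
  | zero =>
    intro x hdx hx
    by_cases hpx : pvPstep p x = x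
    · refine ⟨[], x, by simp, by simp [hx], hx, hpx, ?_⟩
      intro n hn
      match n, hn with
      | n+1, _ => simp [pvRootN, pvDistN, hpx]
    · obtain ⟨hc, hd⟩ := h x hx
      rcases hd with hd | hd
      · exact absurd hd hpx
      · omega
  | succ m ih =>
    intro x hdx hx
    by_cases hpx : pvPstep p x = x
    · refine ⟨[], x, by simp, by simp [hx], hx, hpx, ?_⟩
      intro n hn
      match n, hn with
      | n+1, _ => simp [pvRootN, pvDistN, hpx]
    · obtain ⟨hc, hd⟩ := h x hx
      rcases hd with hd | hd
      · exact absurd hd hpx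
      · obtain ⟨c', r, hnd, hmem, hrc, hrfix, hstab⟩ := ih (pvPstep p x) (by omega) hc
        refine ⟨pvPstep p x :: c', r, ?_, ?_, hrc, hrfix, ?_⟩
        · refine List.Nodup.cons ?_ hnd
          intro hmemx
          have := (hmem x hmemx).2
          omega
        · intro y hy
          rcases List.mem_cons.mp hy with rfl | hy
          · exact ⟨hx, le_rfl⟩
          · obtain ⟨h1, h2⟩ := hmem y hy
            exact ⟨h1, by omega⟩
        · intro n hn
          match n, hn with
          | n+1, hn =>
            have hn' : (pvPstep p x :: c').length ≤ n := by
              simpa using Nat.lt_succ_iff.mp (by simpa using hn)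
            obtain ⟨h1, h2⟩ := hstab n hn'
            constructor
            · simpa [pvRootN, hpx] using h1
            · simp [pvDistN, hpx, h2]

theorem pv_chain_len_le {p : PySem.Dict String String} {c : List String} {x : String}
    (hnd : (x::c).Nodup) (hmem : ∀ y ∈ x::c, p.contains y = true) :
    (x::c).length ≤ p.size := by
  have hsub : (x::c) ⊆ p.keys := by
    intro y hy
    exact (PySem.Dict.contains_iff_mem_keys p y).mp (hmem y hy)
  have hlen : (x::c).length ≤ p.keys.length := by
    calc (x::c).length = (x::c).toFinset.card := (List.toFinset_card_of_nodup hnd).symm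
    _ ≤ p.keys.toFinset.card := Finset.card_le_card (by
        intro a ha; simp only [List.mem_toFinset] at *; exact hsub ha)
    _ ≤ p.keys.length := p.keys.toFinset_card_le
  simpa [PySem.Dict.keys, PySem.Dict.size] using hlen

theorem pvRoot_stable {p : PySem.Dict String String} {d : String → Nat} (h : pvWF p d)
    {x : String} (hx : p.contains x = true) :
    ∀ n, p.size ≤ n → pvRootN p n x = pvRoot p x := by
  obtain ⟨c, r, hnd, hmem, _, _, hstab⟩ := pv_chain h x hx
  have hlen : (x::c).length ≤ p.size := pv_chain_len_le hnd (fun y hy => (hmem y hy).1)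
  intro n hn
  rw [(hstab n (le_trans hlen hn)).1, pvRoot, (hstab p.size hlen).1]

theorem pvRoot_fix {p : PySem.Dict String String} {d : String → Nat} (h : pvWF p d)
    {x : String} (hx : p.contains x = true) :
    p.contains (pvRoot p x) = true ∧ pvPstep p (pvRoot p x) = pvRoot p x := by
  obtain ⟨c, r, hnd, hmem, hrc, hrfix, hstab⟩ := pv_chain h x hx
  have hlen : (x::c).length ≤ p.size := pv_chain_len_le hnd (fun y hy => (hmem y hy).1)
  have : pvRoot p x = r := (hstab p.size hlen).1
  rw [this]; exact ⟨hrc, hrfix⟩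

theorem pvRoot_step {p : PySem.Dict String String} {d : String → Nat} (h : pvWF p d)
    {x : String} (hx : p.contains x = true) :
    pvRoot p (pvPstep p x) = pvRoot p x := by
  by_cases hpx : pvPstep p x = x
  · rw [hpx]
  · have h1 : pvRootN p (p.size + 1) x = pvRootN p p.size (pvPstep p x) := by
      simp [pvRootN, hpx]
    show pvRootN p p.size (pvPstep p x) = pvRoot p x
    rw [← h1, pvRoot_stable h hx (p.size + 1) (Nat.le_succ _)]

theorem pvWF_dist {p : PySem.Dict String String} {d : String → Nat} (h : pvWF p d) :
    pvWF p (pvDist p) ∧ ∀ x, p.contains x = true → pvDist p x < p.size := by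
  have hdist : ∀ x, p.contains x = true → ∀ n, p.size ≤ n → pvDistN p n x = pvDist p x := by
    intro x hx
    obtain ⟨c, r, hnd, hmem, _, _, hstab⟩ := pv_chain h x hx
    have hlen : (x::c).length ≤ p.size := pv_chain_len_le hnd (fun y hy => (hmem y hy).1)
    intro n hn
    rw [(hstab n (le_trans hlen hn)).2, pvDist, (hstab p.size hlen).2]
  have hlt : ∀ x, p.contains x = true → pvDist p x < p.size := by
    intro x hx
    obtain ⟨c, r, hnd, hmem, _, _, hstab⟩ := pv_chain h x hx
    have hlen : (x::c).length ≤ p.size := pv_chain_len_le hnd (fun y hy => (hmem y hy).1)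
    have : pvDist p x = c.length := (hstab p.size hlen).2
    simp at hlen
    omega
  refine ⟨?_, hlt⟩
  intro x hx
  obtain ⟨hc, hd⟩ := h x hx
  refine ⟨hc, ?_⟩
  by_cases hpx : pvPstep p x = x
  · exact Or.inl hpx
  · refine Or.inr ?_
    have h1 : pvDistN p (p.size + 1) x = pvDistN p p.size (pvPstep p x) + 1 := by
      simp [pvDistN, hpx]
    rw [hdist x hx (p.size + 1) (Nat.le_succ _)] at h1
    rw [hdist (pvPstep p x) hc p.size le_rfl] at h1
    omega

theorem pv_contains_insert_of_contains {κ ν : Type} [BEq κ] [LawfulBEq κ]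
    {p : PySem.Dict κ ν} {k : κ} (hk : p.contains k = true) (v : ν) :
    ∀ y, (p.insert k v).contains y = p.contains y := by
  intro y
  rw [PySem.Dict.contains_insert]
  by_cases hy : y = k
  · subst hy; simp [hk]
  · simp [hy]

theorem pv_size_insert_of_contains {κ ν : Type} [BEq κ]
    {p : PySem.Dict κ ν} {k : κ} (hk : p.contains k = true) (v : ν) :
    (p.insert k v).size = p.size := by
  simp [PySem.Dict.insert, hk, PySem.Dict.size]

theorem pv_pstep_insert (p : PySem.Dict String String) (k v y : String) :
    pvPstep (p.insert k v) y = if y = k then v else pvPstep p y := by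
  simp [pvPstep, PySem.Dict.getD_insert]

theorem pvRoot_fixpt (p : PySem.Dict String String) (y : String) (h : pvPstep p y = y) :
    pvRoot p y = y := pvRootN_fix p y h p.size

-- path halving: parent[x] = parent[parent[x]] keeps the forest, its keys and every root
theorem pv_halve {p : PySem.Dict String String} {d : String → Nat} (h : pvWF p d)
    {x : String} (hx : p.contains x = true) (hne : pvPstep p x ≠ x) :
    pvWF (p.insert x (pvPstep p (pvPstep p x))) d ∧
    (∀ y, (p.insert x (pvPstep p (pvPstep p x))).contains y = p.contains y) ∧
    (p.insert x (pvPstep p (pvPstep p x))).size = p.size ∧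
    (∀ y, pvRoot (p.insert x (pvPstep p (pvPstep p x))) y = pvRoot p y) := by
  set w := pvPstep p (pvPstep p x) with hw
  obtain ⟨hcpx, hdpx⟩ := h x hx
  have hdpx : d (pvPstep p x) < d x := hdpx.resolve_left hne
  obtain ⟨hcw, hdw⟩ := h (pvPstep p x) hcpx
  have hdw : d w < d x := by
    rcases hdw with h' | h'
    · rw [← hw] at h'; rw [h']; exact hdpx
    · rw [← hw] at h'; omega
  have hwx : w ≠ x := by intro h'; rw [h'] at hdw; omega
  have hcont : ∀ y, (p.insert x w).contains y = p.contains y :=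
    pv_contains_insert_of_contains hx w
  have hsize : (p.insert x w).size = p.size := pv_size_insert_of_contains hx w
  have hpstep : ∀ y, pvPstep (p.insert x w) y = if y = x then w else pvPstep p y :=
    pv_pstep_insert p x w
  have hwf : pvWF (p.insert x w) d := by
    intro y hy
    rw [hcont] at hy
    rw [hpstep]
    by_cases hyx : y = x
    · subst hyx
      simp only [if_true]
      rw [hcont]
      exact ⟨hcw, Or.inr hdw⟩
    · simp only [if_neg hyx]
      rw [hcont]
      exact h y hy
  refine ⟨hwf, hcont, hsize, ?_⟩
  suffices H : ∀ m y, d y ≤ m → pvRoot (p.insert x w) y = pvRoot p y by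
    intro y; exact H (d y) y le_rfl
  intro m
  induction m with
  | zero =>
    intro y hdy
    by_cases hcy : p.contains y = true
    · by_cases hpy : pvPstep p y = y
      · have hpy' : pvPstep (p.insert x w) y = y := by
          rw [hpstep]
          have hyx : y ≠ x := by intro h'; subst h'; exact hne hpy
          simp [hyx, hpy]
        simp only [pvRoot, pvRootN_fix _ _ hpy', pvRootN_fix _ _ hpy, hsize]
      · obtain ⟨_, hd⟩ := h y hcy
        rcases hd with h' | h'
        · exact absurd h' hpy
        · omega
    · have hcyf : p.contains y = false := by simpa using hcy
      rw [pvRoot_not_contains _ _ ((hcont y).trans hcyf), pvRoot_not_contains _ _ hcyf]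
  | succ m ih =>
    intro y hdy
    by_cases hcy : p.contains y = true
    · by_cases hpy : pvPstep p y = y
      · have hpy' : pvPstep (p.insert x w) y = y := by
          rw [hpstep]
          have hyx : y ≠ x := by intro h'; subst h'; exact hne hpy
          simp [hyx, hpy]
        simp only [pvRoot, pvRootN_fix _ _ hpy', pvRootN_fix _ _ hpy, hsize]
      · by_cases hyx : y = x
        · subst hyx
          have hstep' : pvPstep (p.insert y w) y = w := by rw [hpstep]; simp
          have h1 := pvRoot_step hwf (p := p.insert y w) (x := y) (by rw [hcont]; exact hcy)
          rw [hstep'] at h1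
          rw [← h1, ih w (by omega)]
          have h2 : pvRoot p w = pvRoot p (pvPstep p y) := by
            by_cases hww : w = pvPstep p y
            · rw [hww]
            · rw [hw]; exact pvRoot_step h hcpx
          rw [h2]
          exact pvRoot_step h hcy
        · have hstep' : pvPstep (p.insert x w) y = pvPstep p y := by
            rw [hpstep]; simp [hyx]
          obtain ⟨_, hd⟩ := h y hcy
          have hd : d (pvPstep p y) < d y := hd.resolve_left hpy
          have h1 := pvRoot_step hwf (p := p.insert x w) (x := y) (by rw [hcont]; exact hcy)
          rw [hstep'] at h1
          rw [← h1, ih (pvPstep p y) (by omega)]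
          exact pvRoot_step h hcy
    · have hcyf : p.contains y = false := by simpa using hcy
      rw [pvRoot_not_contains _ _ ((hcont y).trans hcyf), pvRoot_not_contains _ _ hcyf]

theorem pvFindA_spec {p : PySem.Dict String String} {d : String → Nat} (h : pvWF p d)
    {x : String} (hx : p.contains x = true) {fuel : Nat} (hf : d x < fuel) :
    (pvFindA p x fuel).1 = pvRoot p x ∧ pvWF (pvFindA p x fuel).2 d ∧
    (∀ y, (pvFindA p x fuel).2.contains y = p.contains y) ∧
    (pvFindA p x fuel).2.size = p.size ∧
    (∀ y, pvRoot (pvFindA p x fuel).2 y = pvRoot p y) := by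
  induction fuel generalizing p x with
  | zero => omega
  | succ n ih =>
    by_cases hpx : pvPstep p x = x
    · have hgx : ¬ p.getD x x ≠ x := by simpa [pvPstep] using hpx
      have hred : pvFindA p x (n+1) = (x, p) := by
        show (if p.getD x x ≠ x then _ else (x, p)) = (x, p)
        rw [if_neg hgx]
      rw [hred]
      exact ⟨(pvRootN_fix p x hpx p.size).symm, h, fun _ => rfl, rfl, fun _ => rfl⟩
    · have hgx : p.getD x x ≠ x := by simpa [pvPstep] using hpx
      have hred : pvFindA p x (n+1) =
          pvFindA (p.insert x (pvPstep p (pvPstep p x))) (pvPstep p (pvPstep p x)) n := by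
        show (if p.getD x x ≠ x
            then pvFindA (p.insert x (p.getD (p.getD x x) (p.getD x x))) (p.getD (p.getD x x) (p.getD x x)) n
            else (x, p)) = _
        rw [if_pos hgx]
        rfl
      rw [hred]
      obtain ⟨hwf', hcont', hsize', hroot'⟩ := pv_halve h hx hpx
      obtain ⟨hcpx, hdpx⟩ := h x hx
      have hdpx : d (pvPstep p x) < d x := hdpx.resolve_left hpx
      obtain ⟨hcw, hdw⟩ := h (pvPstep p x) hcpx
      have hdw : d (pvPstep p (pvPstep p x)) < d x := by
        rcases hdw with h' | h'
        · rw [h']; exact hdpx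
        · omega
      have hx' : (p.insert x (pvPstep p (pvPstep p x))).contains (pvPstep p (pvPstep p x)) = true := by
        rw [hcont']; exact hcw
      have hf' : d (pvPstep p (pvPstep p x)) < n := by omega
      obtain ⟨g1, g2, g3, g4, g5⟩ := ih hwf' hx' hf'
      refine ⟨?_, g2, ?_, ?_, ?_⟩
      · rw [g1, hroot' _]
        have h2 : pvRoot p (pvPstep p (pvPstep p x)) = pvRoot p (pvPstep p x) := by
          by_cases hww : pvPstep p (pvPstep p x) = pvPstep p x
          · rw [hww]
          · exact pvRoot_step h hcpx
        rw [h2]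
        exact pvRoot_step h hx
      · intro y; rw [g3 y, hcont' y]
      · rw [g4, hsize']
      · intro y; rw [g5 y, hroot' y]

-- linking rb's class under ra
theorem pv_link {p : PySem.Dict String String} {d : String → Nat} (h : pvWF p d)
    {ra rb : String} (hra : p.contains ra = true) (hrb : p.contains rb = true)
    (hfa : pvPstep p ra = ra) (hfb : pvPstep p rb = rb) (hne : ra ≠ rb) :
    (∃ d', pvWF (p.insert rb ra) d') ∧
    (∀ y, (p.insert rb ra).contains y = p.contains y) ∧
    (p.insert rb ra).size = p.size ∧
    (∀ y, pvRoot (p.insert rb ra) y = if pvRoot p y = rb then ra else pvRoot p y) := by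
  have hroot_ra : pvRoot p ra = ra := pvRootN_fix p ra hfa p.size
  have hroot_rb : pvRoot p rb = rb := pvRootN_fix p rb hfb p.size
  have hcont : ∀ y, (p.insert rb ra).contains y = p.contains y :=
    pv_contains_insert_of_contains hrb ra
  have hsize : (p.insert rb ra).size = p.size := pv_size_insert_of_contains hrb ra
  have hpstep : ∀ y, pvPstep (p.insert rb ra) y = if y = rb then ra else pvPstep p y :=
    pv_pstep_insert p rb ra
  set d3 : String → Nat := fun y => if pvRoot p y = rb then d y + d ra + 1 else d y with hd3
  have hwf3 : pvWF (p.insert rb ra) d3 := by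
    intro y hy
    rw [hcont] at hy
    rw [hpstep]
    by_cases hyrb : y = rb
    · simp only [if_pos hyrb]
      rw [hcont]
      refine ⟨hra, Or.inr ?_⟩
      rw [hd3, hyrb]
      simp only [hroot_ra, hroot_rb]
      simp only [if_true]
      rw [if_neg hne]
      omega
    · simp only [if_neg hyrb]
      rw [hcont]
      obtain ⟨h1, h2⟩ := h y hy
      refine ⟨h1, ?_⟩
      rcases h2 with h2 | h2
      · exact Or.inl h2
      · refine Or.inr ?_
        have hstep : pvRoot p (pvPstep p y) = pvRoot p y := pvRoot_step h hy
        rw [hd3]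
        simp only [hstep]
        split <;> omega
  refine ⟨⟨d3, hwf3⟩, hcont, hsize, ?_⟩
  suffices H : ∀ m y, d y ≤ m →
      pvRoot (p.insert rb ra) y = if pvRoot p y = rb then ra else pvRoot p y by
    intro y; exact H (d y) y le_rfl
  have hstep_ra : pvPstep (p.insert rb ra) ra = ra := by
    rw [hpstep, if_neg hne, hfa]
  have hbase : ∀ y, p.contains y = true → pvPstep p y = y →
      pvRoot (p.insert rb ra) y = if pvRoot p y = rb then ra else pvRoot p y := by
    intro y hcy hpy
    by_cases hyrb : y = rb
    · have h1 : pvPstep (p.insert rb ra) y = ra := by rw [hpstep, if_pos hyrb]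
      have h2 := pvRoot_step hwf3 (x := y) (by rw [hcont]; exact hcy)
      rw [h1] at h2
      rw [← h2, pvRoot_fixpt _ ra hstep_ra, hyrb, hroot_rb, if_pos rfl]
    · have h1 : pvPstep (p.insert rb ra) y = y := by rw [hpstep, if_neg hyrb, hpy]
      rw [pvRoot_fixpt _ y h1, pvRoot_fixpt p y hpy, if_neg hyrb]
  intro m
  induction m with
  | zero =>
    intro y hdy
    by_cases hcy : p.contains y = true
    · by_cases hpy : pvPstep p y = y
      · exact hbase y hcy hpy
      · obtain ⟨_, h2⟩ := h y hcy
        rcases h2 with h2 | h2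
        · exact absurd h2 hpy
        · omega
    · have hcyf : p.contains y = false := by simpa using hcy
      have hyrb : y ≠ rb := by rintro rfl; rw [hrb] at hcyf; cases hcyf
      rw [pvRoot_not_contains _ _ ((hcont y).trans hcyf), pvRoot_not_contains _ _ hcyf,
        if_neg hyrb]
  | succ m ih =>
    intro y hdy
    by_cases hcy : p.contains y = true
    · by_cases hpy : pvPstep p y = y
      · exact hbase y hcy hpy
      · have hyrb : y ≠ rb := by rintro rfl; exact hpy hfb
        have h1 : pvPstep (p.insert rb ra) y = pvPstep p y := by
          rw [hpstep, if_neg hyrb]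
        have h2 := pvRoot_step hwf3 (x := y) (by rw [hcont]; exact hcy)
        rw [h1] at h2
        obtain ⟨_, hd2⟩ := h y hcy
        have hd2 : d (pvPstep p y) < d y := hd2.resolve_left hpy
        rw [← h2, ih (pvPstep p y) (by omega), pvRoot_step h hcy]
    · have hcyf : p.contains y = false := by simpa using hcy
      have hyrb : y ≠ rb := by rintro rfl; rw [hrb] at hcyf; cases hcyf
      rw [pvRoot_not_contains _ _ ((hcont y).trans hcyf), pvRoot_not_contains _ _ hcyf,
        if_neg hyrb]

theorem pvUnionA_spec {p : PySem.Dict String String} (h : ∃ d, pvWF p d)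
    {a b : String} (ha : p.contains a = true) (hb : p.contains b = true) :
    (∃ d', pvWF (pvUnionA p a b) d') ∧
    (∀ y, (pvUnionA p a b).contains y = p.contains y) ∧
    (pvUnionA p a b).size = p.size ∧
    (∀ y, pvRoot (pvUnionA p a b) y =
      if pvRoot p y = pvRoot p b then pvRoot p a else pvRoot p y) := by
  obtain ⟨d0, hwf0⟩ := h
  obtain ⟨hwf, hlt⟩ := pvWF_dist hwf0
  set d := pvDist p
  obtain ⟨f1, f2, f3, f4, f5⟩ := pvFindA_spec hwf ha (fuel := p.size + 1) (by have := hlt a ha; omega)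
  set fa := pvFindA p a (p.size + 1) with hfa
  have hb2 : fa.2.contains b = true := by rw [f3]; exact hb
  obtain ⟨g1, g2, g3, g4, g5⟩ := pvFindA_spec f2 hb2 (fuel := fa.2.size + 1)
    (by rw [f4]; have := hlt b hb; omega)
  set fb := pvFindA fa.2 b (fa.2.size + 1) with hfb
  have hra : fa.1 = pvRoot p a := f1
  have hrb : fb.1 = pvRoot p b := by rw [g1, f5]
  show _ ∧ _ ∧ _ ∧ _
  by_cases hne : fa.1 ≠ fb.1
  · simp only [pvUnionA, ← hfa, ← hfb, if_pos hne]
    have hcra : fb.2.contains fa.1 = true := by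
      rw [g3, f3, hra]; exact (pvRoot_fix hwf ha).1
    have hcrb : fb.2.contains fb.1 = true := by
      rw [g3, f3, hrb]; exact (pvRoot_fix hwf hb).1
    have hfixa : pvPstep fb.2 fa.1 = fa.1 := by
      have hca : fb.2.contains a = true := by rw [g3, f3]; exact ha
      have := (pvRoot_fix g2 hca).2
      have hr : pvRoot fb.2 a = fa.1 := by rw [g5, f5, hra]
      rwa [hr] at this
    have hfixb : pvPstep fb.2 fb.1 = fb.1 := by
      have hcb : fb.2.contains b = true := by rw [g3, f3]; exact hb
      have := (pvRoot_fix g2 hcb).2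
      have hr : pvRoot fb.2 b = fb.1 := by rw [g5, f5, hrb]
      rwa [hr] at this
    obtain ⟨l1, l2, l3, l4⟩ := pv_link g2 hcra hcrb hfixa hfixb hne
    refine ⟨l1, ?_, ?_, ?_⟩
    · intro y; rw [l2 y, g3 y, f3 y]
    · rw [l3, g4, f4]
    · intro y
      rw [l4 y, g5 y, f5 y, hra, hrb]
  · simp only [pvUnionA, ← hfa, ← hfb, if_neg hne]
    have hne : fa.1 = fb.1 := not_ne_iff.mp hne
    refine ⟨⟨d, g2⟩, fun y => by rw [g3 y, f3 y], by rw [g4, f4], ?_⟩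
    intro y
    rw [g5 y, f5 y]
    have : pvRoot p a = pvRoot p b := by rw [← hra, ← hrb, hne]
    split
    · rename_i hcond; rw [this, ← hcond]
    · rfl


-- ----- phase 1: the flattened triples and the two maps (B's formulation) -----

def pvStep1 (d : PySem.Dict String (PySem.Set String)) (t : String × String × String) :
    PySem.Dict String (PySem.Set String) :=
  d.modify t.2.2 PySem.Set.empty (fun s => PySem.Set.update s [t.1, t.2.1])

def pvStep2 (d : PySem.Dict String (PySem.Set String)) (t : String × String × String) :
    PySem.Dict String (PySem.Set String) :=
  (d.modify t.1 PySem.Set.empty (fun s => PySem.Set.add s t.2.2)).modify t.2.1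
    PySem.Set.empty (fun s => PySem.Set.add s t.2.2)

def pvTriples (sm : List (String × List (String × List String))) : List (String × String × String) :=
  sm.flatMap (fun vc => vc.2.flatMap (fun ci => ci.2.map (fun _id => (vc.1, ci.1, _id))))

def pvIdn (sm : List (String × List (String × List String))) : PySem.Dict String (PySem.Set String) :=
  (pvTriples sm).foldl pvStep1 PySem.Dict.empty

def pvNti (sm : List (String × List (String × List String))) : PySem.Dict String (PySem.Set String) :=
  (pvTriples sm).foldl pvStep2 PySem.Dict.empty

theorem pv_inner_eq (v c : String) :
    ∀ (ids : List String) (m : PySem.Dict String (PySem.Set String) × PySem.Dict String (PySem.Set String)),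
    ids.foldl (fun m _id =>
        ( m.1.modify _id PySem.Set.empty (fun s => PySem.Set.update s [v, c]),
          (m.2.modify v PySem.Set.empty (fun s => PySem.Set.add s _id)).modify c
            PySem.Set.empty (fun s => PySem.Set.add s _id) )) m
    = ((ids.map (fun _id => (v, c, _id))).foldl pvStep1 m.1,
       (ids.map (fun _id => (v, c, _id))).foldl pvStep2 m.2) := by
  intro ids
  induction ids with
  | nil => intro m; rfl
  | cons i ids ih => intro m; rw [List.foldl_cons, ih]; rfl

theorem pv_mid_eq (v : String) :
    ∀ (cm : List (String × List String)) (m : PySem.Dict String (PySem.Set String) × PySem.Dict String (PySem.Set String)),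
    cm.foldl (fun m ci =>
        ci.2.foldl (fun m _id =>
          ( m.1.modify _id PySem.Set.empty (fun s => PySem.Set.update s [v, ci.1]),
            (m.2.modify v PySem.Set.empty (fun s => PySem.Set.add s _id)).modify ci.1
              PySem.Set.empty (fun s => PySem.Set.add s _id) )) m) m
    = (((cm.flatMap (fun ci => ci.2.map (fun _id => (v, ci.1, _id))))).foldl pvStep1 m.1,
       ((cm.flatMap (fun ci => ci.2.map (fun _id => (v, ci.1, _id))))).foldl pvStep2 m.2) := by
  intro cm
  induction cm with
  | nil => intro m; rfl
  | cons ci cm ih =>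
    intro m
    rw [List.foldl_cons, ih, pv_inner_eq v ci.1 ci.2 m, List.flatMap_cons,
      List.foldl_append, List.foldl_append]

theorem pv_maps_eq (sm : List (String × List (String × List String))) :
    sm.foldl (fun (m : PySem.Dict String (PySem.Set String) × PySem.Dict String (PySem.Set String)) vc =>
      vc.2.foldl (fun m ci =>
        ci.2.foldl (fun m _id =>
          ( m.1.modify _id PySem.Set.empty (fun s => PySem.Set.update s [vc.1, ci.1]),
            (m.2.modify vc.1 PySem.Set.empty (fun s => PySem.Set.add s _id)).modify ci.1
              PySem.Set.empty (fun s => PySem.Set.add s _id) )) m) m)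
      (PySem.Dict.empty, PySem.Dict.empty)
    = (pvIdn sm, pvNti sm) := by
  suffices H : ∀ (sm : List (String × List (String × List String)))
      (m : PySem.Dict String (PySem.Set String) × PySem.Dict String (PySem.Set String)),
      sm.foldl (fun m vc =>
        vc.2.foldl (fun m ci =>
          ci.2.foldl (fun m _id =>
            ( m.1.modify _id PySem.Set.empty (fun s => PySem.Set.update s [vc.1, ci.1]),
              (m.2.modify vc.1 PySem.Set.empty (fun s => PySem.Set.add s _id)).modify ci.1
                PySem.Set.empty (fun s => PySem.Set.add s _id) )) m) m) m
      = ((pvTriples sm).foldl pvStep1 m.1, (pvTriples sm).foldl pvStep2 m.2) by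
    rw [H]; rfl
  intro sm
  induction sm with
  | nil => intro m; rfl
  | cons vc sm ih =>
    intro m
    rw [List.foldl_cons, ih, pv_mid_eq vc.1 vc.2 m]
    simp only [pvTriples, List.flatMap_cons, List.foldl_append]

theorem pv_maps_fst (sm : List (String × List (String × List String))) :
    (sm.foldl (fun (m : PySem.Dict String (PySem.Set String) × PySem.Dict String (PySem.Set String)) vc =>
      vc.2.foldl (fun m ci =>
        ci.2.foldl (fun m _id =>
          ( m.1.modify _id PySem.Set.empty (fun s => PySem.Set.update s [vc.1, ci.1]),
            (m.2.modify vc.1 PySem.Set.empty (fun s => PySem.Set.add s _id)).modify ci.1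
              PySem.Set.empty (fun s => PySem.Set.add s _id) )) m) m)
      (PySem.Dict.empty, PySem.Dict.empty)).1 = pvIdn sm := by
  rw [pv_maps_eq]

theorem pv_maps_snd (sm : List (String × List (String × List String))) :
    (sm.foldl (fun (m : PySem.Dict String (PySem.Set String) × PySem.Dict String (PySem.Set String)) vc =>
      vc.2.foldl (fun m ci =>
        ci.2.foldl (fun m _id =>
          ( m.1.modify _id PySem.Set.empty (fun s => PySem.Set.update s [vc.1, ci.1]),
            (m.2.modify vc.1 PySem.Set.empty (fun s => PySem.Set.add s _id)).modify ci.1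
              PySem.Set.empty (fun s => PySem.Set.add s _id) )) m) m)
      (PySem.Dict.empty, PySem.Dict.empty)).2 = pvNti sm := by
  rw [pv_maps_eq]

-- ----- facts about the maps -----

theorem pv_nodup_keys_idn (sm : List (String × List (String × List String))) :
    (pvIdn sm).keys.Nodup := by
  have := PySem.Dict.nodup_keys_foldl_modify_key (pvTriples sm) (fun t => t.2.2)
    PySem.Set.empty (fun _ t s => PySem.Set.update s [t.1, t.2.1]) PySem.Dict.empty (by simp [PySem.Dict.keys, PySem.Dict.empty])
  exact this

theorem pv_values_insert_mem {κ ν : Type} [BEq κ] (d : PySem.Dict κ ν) (k : κ) (v : ν) :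
    ∀ w ∈ (d.insert k v).values, w = v ∨ w ∈ d.values := by
  intro w hw
  simp only [PySem.Dict.insert] at hw
  by_cases hc : d.contains k = true
  · rw [if_pos hc] at hw
    simp only [PySem.Dict.values, List.map_map, List.mem_map, Function.comp] at hw
    obtain ⟨p, hp, hpe⟩ := hw
    by_cases hpk : (p.1 == k) = true
    · rw [if_pos hpk] at hpe
      left; exact hpe.symm
    · rw [if_neg hpk] at hpe
      right
      rw [← hpe]
      exact List.mem_map_of_mem hp
  · rw [if_neg hc] at hw
    simp only [PySem.Dict.values, List.map_append, List.mem_append] at hw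
    rcases hw with hw | hw
    · right; exact hw
    · left; simpa using hw

theorem pv_getD_mem_values {κ ν : Type} [BEq κ] (d : PySem.Dict κ ν) (k : κ) (dflt : ν) :
    d.getD k dflt = dflt ∨ d.getD k dflt ∈ d.values := by
  simp only [PySem.Dict.getD, PySem.Dict.get?]
  cases hf : d.items.find? (fun p => p.1 == k) with
  | none => left; rfl
  | some p =>
    right
    have := List.mem_of_find?_eq_some hf
    simp only [Option.map_some, Option.getD_some, PySem.Dict.values]
    exact List.mem_map_of_mem this

theorem pv_set_add_ne_nil {α : Type} [BEq α] (s : PySem.Set α) (x : α) :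
    PySem.Set.add s x ≠ [] := by
  simp only [PySem.Set.add]
  split
  · rintro rfl; simp [PySem.Set.contains] at *
  · simp

theorem pv_step2_vals_nonempty (l : List (String × String × String)) :
    ∀ s ∈ (l.foldl pvStep2 PySem.Dict.empty).values, s ≠ [] := by
  induction l using List.reverseRecOn with
  | nil => intro s hs; simp [PySem.Dict.values, PySem.Dict.empty] at hs
  | append_singleton l t ih =>
    rw [List.foldl_append, List.foldl_cons, List.foldl_nil]
    set d := l.foldl pvStep2 PySem.Dict.empty
    intro s hs
    simp only [pvStep2, PySem.Dict.modify] at hs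
    rcases pv_values_insert_mem _ _ _ s hs with rfl | hs
    · exact pv_set_add_ne_nil _ _
    · rcases pv_values_insert_mem _ _ _ s hs with rfl | hs
      · exact pv_set_add_ne_nil _ _
      · exact ih s hs

theorem pv_nti_vals_nonempty (sm : List (String × List (String × List String))) :
    ∀ s ∈ (pvNti sm).values, s ≠ [] :=
  pv_step2_vals_nonempty (pvTriples sm)

theorem pv_modify_add_vals {κ : Type} [BEq κ] (dd : PySem.Dict κ (PySem.Set String)) (k : κ) (z : String) :
    ∀ s ∈ (dd.modify k PySem.Set.empty (fun s => PySem.Set.add s z)).values, ∀ i ∈ s,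
      i = z ∨ ∃ s' ∈ dd.values, i ∈ s' := by
  intro s hs i hi
  simp only [PySem.Dict.modify] at hs
  rcases pv_values_insert_mem _ _ _ s hs with rfl | hs
  · rcases (PySem.Set.mem_add _ _ _).mp hi with hi | rfl
    · rcases pv_getD_mem_values dd k PySem.Set.empty with he | he
      · rw [he] at hi; exact absurd hi (by simp [PySem.Set.empty])
      · exact Or.inr ⟨_, he, hi⟩
    · exact Or.inl rfl
  · exact Or.inr ⟨s, hs, hi⟩

theorem pv_vals_mem_aux (l : List (String × String × String)) :
    ∀ s ∈ (l.foldl pvStep2 PySem.Dict.empty).values, ∀ i ∈ s,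
      (l.foldl pvStep1 PySem.Dict.empty).contains i = true := by
  induction l using List.reverseRecOn with
  | nil => intro s hs; simp [PySem.Dict.values, PySem.Dict.empty] at hs
  | append_singleton l t ih =>
    rw [List.foldl_append, List.foldl_append, List.foldl_cons, List.foldl_nil,
      List.foldl_cons, List.foldl_nil]
    set d2 := l.foldl pvStep2 PySem.Dict.empty
    set d1 := l.foldl pvStep1 PySem.Dict.empty
    have hcont1 : ∀ i, (pvStep1 d1 t).contains i = ((i == t.2.2) || d1.contains i) := by
      intro i
      simp only [pvStep1, PySem.Dict.modify]
      rw [PySem.Dict.contains_insert]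
    intro s hs i hi
    rw [hcont1]
    have hconc : i = t.2.2 ∨ ∃ s' ∈ d2.values, i ∈ s' := by
      simp only [pvStep2] at hs
      rcases pv_modify_add_vals _ _ _ s hs i hi with h' | ⟨s', hs', hi'⟩
      · exact Or.inl h'
      · rcases pv_modify_add_vals _ _ _ s' hs' i hi' with h' | ⟨s'', hs'', hi''⟩
        · exact Or.inl h'
        · exact Or.inr ⟨s'', hs'', hi''⟩
    rcases hconc with rfl | ⟨s', hs', hi'⟩
    · simp
    · rw [ih s' hs' i hi', Bool.or_true]

theorem pv_nti_vals_mem (sm : List (String × List (String × List String))) :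
    ∀ s ∈ (pvNti sm).values, ∀ i ∈ s, (pvIdn sm).contains i = true :=
  pv_vals_mem_aux (pvTriples sm)


-- ----- phase 2: the label/parent invariant -----

def pvRelabel (lab : PySem.Dict String Int) (old target : Int) : PySem.Dict String Int :=
  PySem.Dict.mk (lab.items.map (fun kv => if kv.2 = old then (kv.1, target) else kv))

def pvLabStep (target : Int) (lab : PySem.Dict String Int) (other : String) : PySem.Dict String Int :=
  if lab.getD other 0 ≠ target then pvRelabel lab (lab.getD other 0) target else lab

def pvInv (p : PySem.Dict String String) (lab : PySem.Dict String Int) : Prop :=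
  (∀ x, p.contains x = lab.contains x) ∧ (∃ d, pvWF p d) ∧
  (∀ x y, p.contains x = true → p.contains y = true →
    (pvRoot p x = pvRoot p y ↔ lab.get? x = lab.get? y))

theorem pv_get?_of_contains {κ ν : Type} [BEq κ] (d : PySem.Dict κ ν) (k : κ)
    (h : d.contains k = true) : ∃ v, d.get? k = some v := by
  simp only [PySem.Dict.contains, List.any_eq_true] at h
  obtain ⟨pq, hp, he⟩ := h
  simp only [PySem.Dict.get?]
  cases hf : d.items.find? (fun p => p.1 == k) with
  | none =>
    rw [List.find?_eq_none] at hf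
    exact absurd he (by simpa using hf pq hp)
  | some q => exact ⟨q.2, rfl⟩

theorem pv_relabel_get? (lab : PySem.Dict String Int) (old target : Int) (x : String) :
    (pvRelabel lab old target).get? x =
      (lab.get? x).map (fun v => if v = old then target else v) := by
  simp only [pvRelabel, PySem.Dict.get?]
  rw [List.find?_map]
  have hpf : ((fun (p : String × Int) => p.1 == x) ∘ fun kv => if kv.2 = old then (kv.1, target) else kv)
      = (fun (p : String × Int) => p.1 == x) := by
    funext kv; simp only [Function.comp]; split <;> rfl
  rw [hpf]
  cases lab.items.find? (fun p => p.1 == x) with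
  | none => rfl
  | some q =>
    simp only [Option.map_some]
    split <;> rfl

theorem pv_relabel_contains (lab : PySem.Dict String Int) (old target : Int) (x : String) :
    (pvRelabel lab old target).contains x = lab.contains x := by
  simp only [pvRelabel, PySem.Dict.contains, List.any_map]
  congr 1
  funext kv; simp only [Function.comp]; split <;> rfl

theorem pv_merge_step {p : PySem.Dict String String} {lab : PySem.Dict String Int}
    {a other : String} {target : Int}
    (hinv : pvInv p lab) (ha : p.contains a = true) (hb : p.contains other = true)
    (hta : lab.get? a = some target) :
    pvInv (pvUnionA p a other) (pvLabStep target lab other) ∧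
    (pvLabStep target lab other).get? a = some target ∧
    (∀ x, (pvUnionA p a other).contains x = p.contains x) ∧
    (∀ x, (pvLabStep target lab other).contains x = lab.contains x) := by
  obtain ⟨hct, hwf, hker⟩ := hinv
  obtain ⟨old, hold⟩ := pv_get?_of_contains lab other (by rw [← hct]; exact hb)
  have hgetd : lab.getD other 0 = old := by simp [PySem.Dict.getD, hold]
  obtain ⟨u1, u2, u3, u4⟩ := pvUnionA_spec hwf ha hb
  by_cases hcase : old = target
  · have hstep : pvLabStep target lab other = lab := by
      simp [pvLabStep, hgetd, hcase]
    rw [hstep]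
    have hreq : pvRoot p a = pvRoot p other := by
      rw [hker a other ha hb, hta, hold, hcase]
    have hroot : ∀ y, pvRoot (pvUnionA p a other) y = pvRoot p y := by
      intro y
      rw [u4 y]
      split
      · rename_i hcond; rw [hreq, ← hcond]
      · rfl
    refine ⟨⟨?_, u1, ?_⟩, hta, u2, fun _ => rfl⟩
    · intro x; rw [u2 x, hct x]
    · intro x y hx hy
      rw [u2] at hx hy
      rw [hroot x, hroot y]
      exact hker x y hx hy
  · have hstep : pvLabStep target lab other = pvRelabel lab old target := by
      simp [pvLabStep, hgetd, hcase]
    rw [hstep]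
    have hrne : pvRoot p a ≠ pvRoot p other := by
      intro hcontra
      rw [hker a other ha hb, hta, hold] at hcontra
      exact hcase ((Option.some_injective _ hcontra).symm)
    have hxb : ∀ x, p.contains x = true → (pvRoot p x = pvRoot p other ↔ lab.get? x = some old) := by
      intro x hx; rw [hker x other hx hb, hold]
    have hxa : ∀ x, p.contains x = true → (pvRoot p x = pvRoot p a ↔ lab.get? x = some target) := by
      intro x hx; rw [hker x a hx ha, hta]
    refine ⟨⟨?_, u1, ?_⟩, ?_, u2, fun x => pv_relabel_contains lab old target x⟩
    · intro x; rw [u2 x, hct x, pv_relabel_contains]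
    · intro x y hx hy
      rw [u2] at hx hy
      obtain ⟨vx, hvx⟩ := pv_get?_of_contains lab x (by rw [← hct]; exact hx)
      obtain ⟨vy, hvy⟩ := pv_get?_of_contains lab y (by rw [← hct]; exact hy)
      rw [u4 x, u4 y, pv_relabel_get?, pv_relabel_get?, hvx, hvy]
      simp only [Option.map_some, Option.some_inj]
      have hxbv : pvRoot p x = pvRoot p other ↔ vx = old := by
        rw [hxb x hx, hvx, Option.some_inj]
      have hybv : pvRoot p y = pvRoot p other ↔ vy = old := by
        rw [hxb y hy, hvy, Option.some_inj]
      have hxav : pvRoot p x = pvRoot p a ↔ vx = target := by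
        rw [hxa x hx, hvx, Option.some_inj]
      have hyav : pvRoot p y = pvRoot p a ↔ vy = target := by
        rw [hxa y hy, hvy, Option.some_inj]
      have hkerv : pvRoot p x = pvRoot p y ↔ vx = vy := by
        rw [hker x y hx hy, hvx, hvy, Option.some_inj]
      by_cases hvxo : vx = old <;> by_cases hvyo : vy = old
      · rw [if_pos (hxbv.mpr hvxo), if_pos (hybv.mpr hvyo), if_pos hvxo, if_pos hvyo]
        simp
      · rw [if_pos (hxbv.mpr hvxo), if_neg (fun h => hvyo (hybv.mp h)), if_pos hvxo, if_neg hvyo]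
        rw [eq_comm (a := pvRoot p a), hyav, eq_comm (a := target)]
      · rw [if_neg (fun h => hvxo (hxbv.mp h)), if_pos (hybv.mpr hvyo), if_pos hvyo, if_neg hvxo]
        rw [hxav]
      · rw [if_neg (fun h => hvxo (hxbv.mp h)), if_neg (fun h => hvyo (hybv.mp h)),
          if_neg hvxo, if_neg hvyo]
        exact hkerv
    · rw [pv_relabel_get?, hta]
      simp only [Option.map_some]
      rw [if_neg (fun h => hcase h.symm)]

theorem pv_inner_merge (a : String) (target : Int) :
    ∀ (t : List String) (p : PySem.Dict String String) (lab : PySem.Dict String Int),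
    pvInv p lab → p.contains a = true → (∀ o ∈ t, p.contains o = true) →
    lab.get? a = some target →
    pvInv (t.foldl (fun p o => pvUnionA p a o) p) (t.foldl (pvLabStep target) lab) ∧
    (∀ x, (t.foldl (fun p o => pvUnionA p a o) p).contains x = p.contains x) ∧
    (∀ x, (t.foldl (pvLabStep target) lab).contains x = lab.contains x) := by
  intro t
  induction t with
  | nil => intro p lab hinv _ _ _; exact ⟨hinv, fun _ => rfl, fun _ => rfl⟩
  | cons o t ih =>
    intro p lab hinv ha hmem hta
    obtain ⟨m1, m2, m3, m4⟩ := pv_merge_step hinv ha (hmem o (List.mem_cons_self)) hta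
    rw [List.foldl_cons, List.foldl_cons]
    obtain ⟨i1, i2, i3⟩ := ih (pvUnionA p a o) (pvLabStep target lab o) m1
      (by rw [m3]; exact ha) (fun o' ho' => by rw [m3]; exact hmem o' (List.mem_cons_of_mem _ ho')) m2
    refine ⟨i1, ?_, ?_⟩
    · intro x; rw [i2 x, m3 x]
    · intro x; rw [i3 x, m4 x]

theorem pv_outer_merge :
    ∀ (vals : List (PySem.Set String)) (p : PySem.Dict String String) (lab : PySem.Dict String Int),
    pvInv p lab → (∀ s ∈ vals, s ≠ [] ∧ ∀ i ∈ s, p.contains i = true) →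
    pvInv (vals.foldl (fun p ids => (ids.drop 1).foldl
              (fun p o => pvUnionA p (PySem.List.pyGetD ids 0 "") o) p) p)
          (vals.foldl (fun lab ids => (ids.drop 1).foldl
              (pvLabStep (lab.getD (PySem.List.pyGetD ids 0 "") 0)) lab) lab) ∧
    (∀ x, (vals.foldl (fun p ids => (ids.drop 1).foldl
              (fun p o => pvUnionA p (PySem.List.pyGetD ids 0 "") o) p) p).contains x = p.contains x) := by
  intro vals
  induction vals with
  | nil => intro p lab hinv _; exact ⟨hinv, fun _ => rfl⟩
  | cons ids vals ih =>
    intro p lab hinv hmem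
    obtain ⟨hne, hels⟩ := hmem ids (List.mem_cons_self)
    obtain ⟨h, tl, rfl⟩ : ∃ h tl, ids = h :: tl := by
      cases ids with
      | nil => exact absurd rfl hne
      | cons h tl => exact ⟨h, tl, rfl⟩
    have hh : PySem.List.pyGetD (h :: tl) 0 "" = h := by simp [pysem]
    have hch : p.contains h = true := hels h (List.mem_cons_self)
    have hclh : lab.contains h = true := by rw [← hinv.1]; exact hch
    obtain ⟨target, htg⟩ := pv_get?_of_contains lab h hclh
    have htgD : lab.getD h 0 = target := by simp [PySem.Dict.getD, htg]
    rw [List.foldl_cons, List.foldl_cons]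
    simp only [hh, htgD, List.drop_succ_cons, List.drop_zero]
    obtain ⟨i1, i2, i3⟩ := pv_inner_merge h target tl p lab hinv hch
      (fun o ho => hels o (List.mem_cons_of_mem _ ho)) htg
    obtain ⟨o1, o2⟩ := ih _ _ i1 (by
      intro s hs
      refine ⟨(hmem s (List.mem_cons_of_mem _ hs)).1, ?_⟩
      intro i hi
      rw [i2]
      exact (hmem s (List.mem_cons_of_mem _ hs)).2 i hi)
    refine ⟨o1, ?_⟩
    intro x; rw [o2 x, i2 x]

-- ----- initial parent / label tables -----

def pvParent0 (ks : List String) : PySem.Dict String String :=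
  ks.foldl (fun p i => p.insert i i) PySem.Dict.empty

def pvLabel0 (ks : List String) : PySem.Dict String Int :=
  (PySem.List.enumerate ks 0).foldl (fun d pr => d.insert pr.2 pr.1) PySem.Dict.empty

theorem pv_parent0_items (ks : List String) (hnd : ks.Nodup) :
    (pvParent0 ks).items = ks.map (fun k => (k, k)) := by
  have := PySem.Dict.items_foldl_insert_fresh ks (fun k => k) (fun k => k) PySem.Dict.empty
    (fun a _ => rfl) (by simpa using hnd)
  simpa [PySem.Dict.empty] using this

theorem pv_parent0_contains (ks : List String) (hnd : ks.Nodup) (x : String) :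
    (pvParent0 ks).contains x = ks.any (fun k => k == x) := by
  rw [show (pvParent0 ks).contains x = (pvParent0 ks).items.any (fun p => p.1 == x) from rfl,
    pv_parent0_items ks hnd, List.any_map]
  rfl

theorem pv_find_self (ks : List String) (x : String) :
    ks.find? (fun k => k == x) = if x ∈ ks then some x else none := by
  induction ks with
  | nil => simp
  | cons k ks ih =>
    by_cases hk : k = x
    · subst hk; simp
    · rw [List.find?_cons_of_neg (by simp [hk]), ih]
      simp [List.mem_cons, Ne.symm hk]

theorem pv_parent0_get? (ks : List String) (hnd : ks.Nodup) (x : String) :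
    (pvParent0 ks).get? x = if x ∈ ks then some x else none := by
  rw [show (pvParent0 ks).get? x = ((pvParent0 ks).items.find? (fun p => p.1 == x)).map (·.2) from rfl,
    pv_parent0_items ks hnd, List.find?_map]
  rw [show ((fun (p : String × String) => p.1 == x) ∘ fun k => (k, k)) = (fun k => k == x) from rfl,
    pv_find_self]
  split <;> rfl

theorem pv_parent0_pstep (ks : List String) (hnd : ks.Nodup) (x : String) :
    pvPstep (pvParent0 ks) x = x := by
  rw [pvPstep, PySem.Dict.getD, pv_parent0_get? ks hnd]
  split <;> rfl

theorem pv_wf0 (ks : List String) (hnd : ks.Nodup) : pvWF (pvParent0 ks) (fun _ => 0) := by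
  intro x hx
  rw [pv_parent0_pstep ks hnd]
  exact ⟨hx, Or.inl rfl⟩

theorem pv_label0_items (ks : List String) (hnd : ks.Nodup) :
    (pvLabel0 ks).items = (PySem.List.enumerate ks 0).map (fun pr => (pr.2, pr.1)) := by
  have := PySem.Dict.items_foldl_insert_fresh (PySem.List.enumerate ks 0)
    (fun pr => pr.2) (fun pr => pr.1) PySem.Dict.empty (fun a _ => rfl)
    (by rw [PySem.List.map_snd_enumerate]; exact hnd)
  simpa [PySem.Dict.empty] using this

theorem pv_label0_contains (ks : List String) (hnd : ks.Nodup) (x : String) :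
    (pvLabel0 ks).contains x = ks.any (fun k => k == x) := by
  rw [show (pvLabel0 ks).contains x = (pvLabel0 ks).items.any (fun p => p.1 == x) from rfl,
    pv_label0_items ks hnd, List.any_map]
  rw [show ks.any (fun k => k == x) = ((PySem.List.enumerate ks 0).map (·.2)).any (fun k => k == x) by
    rw [PySem.List.map_snd_enumerate], List.any_map]
  rfl

theorem pv_enumdict_get?_bound :
    ∀ (ks : List String) (s : Int) (x : String) (v : Int),
    (PySem.Dict.mk ((PySem.List.enumerate ks s).map (fun pr => (pr.2, pr.1)))).get? x = some v →
    s ≤ v := by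
  intro ks
  induction ks with
  | nil => intro s x v h; simp [PySem.List.enumerate, PySem.Dict.get?] at h
  | cons k ks ih =>
    intro s x v h
    rw [PySem.List.enumerate_cons, List.map_cons, PySem.Dict.get?_mk_cons] at h
    by_cases hk : (k == x) = true
    · rw [if_pos hk] at h
      cases h; omega
    · rw [if_neg hk] at h
      have := ih (s + 1) x v h
      omega

theorem pv_enumdict_inj :
    ∀ (ks : List String) (s : Int) (x y : String) (vx vy : Int),
    (PySem.Dict.mk ((PySem.List.enumerate ks s).map (fun pr => (pr.2, pr.1)))).get? x = some vx →
    (PySem.Dict.mk ((PySem.List.enumerate ks s).map (fun pr => (pr.2, pr.1)))).get? y = some vy →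
    vx = vy → x = y := by
  intro ks
  induction ks with
  | nil => intro s x y vx vy hx; simp [PySem.List.enumerate, PySem.Dict.get?] at hx
  | cons k ks ih =>
    intro s x y vx vy hx hy hv
    rw [PySem.List.enumerate_cons, List.map_cons, PySem.Dict.get?_mk_cons] at hx hy
    by_cases hkx : (k == x) = true <;> by_cases hky : (k == y) = true
    · have h1 : k = x := by simpa using hkx
      have h2 : k = y := by simpa using hky
      rw [← h1, h2]
    · rw [if_pos hkx] at hx
      rw [if_neg hky] at hy
      cases hx
      have := pv_enumdict_get?_bound ks (s + 1) y vy hy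
      omega
    · rw [if_neg hkx] at hx
      rw [if_pos hky] at hy
      cases hy
      have := pv_enumdict_get?_bound ks (s + 1) x vx hx
      omega
    · rw [if_neg hkx] at hx
      rw [if_neg hky] at hy
      exact ih (s + 1) x y vx vy hx hy hv

theorem pv_inv0 (ks : List String) (hnd : ks.Nodup) : pvInv (pvParent0 ks) (pvLabel0 ks) := by
  refine ⟨?_, ⟨fun _ => 0, pv_wf0 ks hnd⟩, ?_⟩
  · intro x
    rw [pv_parent0_contains ks hnd, pv_label0_contains ks hnd]
  · intro x y hx hy
    have hroot : ∀ z, pvRoot (pvParent0 ks) z = z := fun z =>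
      pvRoot_fixpt _ z (pv_parent0_pstep ks hnd z)
    rw [hroot x, hroot y]
    constructor
    · rintro rfl; rfl
    · intro hg
      have hcx : (pvLabel0 ks).contains x = true := by
        rw [pv_label0_contains ks hnd, ← pv_parent0_contains ks hnd]
        exact hx
      obtain ⟨vx, hvx⟩ := pv_get?_of_contains _ x hcx
      have hvy : (pvLabel0 ks).get? y = some vx := by rw [← hg, hvx]
      have hx' : (PySem.Dict.mk ((PySem.List.enumerate ks 0).map (fun pr => (pr.2, pr.1)))).get? x = some vx := by
        rw [← pv_label0_items ks hnd]; exact hvx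
      have hy' : (PySem.Dict.mk ((PySem.List.enumerate ks 0).map (fun pr => (pr.2, pr.1)))).get? y = some vx := by
        rw [← pv_label0_items ks hnd]; exact hvy
      exact pv_enumdict_inj ks 0 x y vx vx hx' hy' rfl

-- ----- phase 3: the final grouping loops -----

theorem pv_phase3_aux :
    ∀ (its : List (String × PySem.Set String)) (p : PySem.Dict String String)
      (D : PySem.Dict String (PySem.Set String)) (R : String → String),
    (∃ d, pvWF p d) → (∀ kv ∈ its, p.contains kv.1 = true) → (∀ y, pvRoot p y = R y) →
    (its.foldl (fun (st : PySem.Dict String String × PySem.Dict String (PySem.Set String)) kv =>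
        ((pvFindA st.1 kv.1 (st.1.size + 1)).2,
         st.2.modify (pvFindA st.1 kv.1 (st.1.size + 1)).1 PySem.Set.empty
            (fun s => PySem.Set.update s kv.2))) (p, D)).2
    = its.foldl (fun D kv => D.modify (R kv.1) PySem.Set.empty
        (fun s => PySem.Set.update s kv.2)) D := by
  intro its
  induction its with
  | nil => intro p D R _ _ _; rfl
  | cons kv its ih =>
    intro p D R hwf hmem hR
    obtain ⟨d, hwfd⟩ := hwf
    obtain ⟨hwfc, hlt⟩ := pvWF_dist hwfd
    have hx : p.contains kv.1 = true := hmem kv (List.mem_cons_self)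
    obtain ⟨f1, f2, f3, f4, f5⟩ := pvFindA_spec hwfc hx (fuel := p.size + 1)
      (by have := hlt kv.1 hx; omega)
    rw [List.foldl_cons, List.foldl_cons]
    have hstep := ih (pvFindA p kv.1 (p.size + 1)).2
      (D.modify ((pvFindA p kv.1 (p.size + 1)).1) PySem.Set.empty (fun s => PySem.Set.update s kv.2)) R
      ⟨pvDist p, f2⟩
      (fun kv' hkv' => by rw [f3]; exact hmem kv' (List.mem_cons_of_mem _ hkv'))
      (fun y => by rw [f5 y, hR y])
    rw [hstep, f1, hR kv.1]

-- ----- grouping by an arbitrary key, and its values -----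

theorem pv_group_getD {κ : Type} [BEq κ] [LawfulBEq κ] [DecidableEq κ]
    (f : (String × PySem.Set String) → κ) :
    ∀ (l : List (String × PySem.Set String)) (D : PySem.Dict κ (PySem.Set String)) (k : κ),
    (l.foldl (fun D kv => D.modify (f kv) PySem.Set.empty
        (fun s => PySem.Set.update s kv.2)) D).getD k PySem.Set.empty
    = (l.filter (fun kv => f kv == k)).foldl (fun s kv => PySem.Set.update s kv.2)
        (D.getD k PySem.Set.empty) := by
  intro l
  induction l with
  | nil => intro D k; rfl
  | cons kv l ih =>
    intro D k
    rw [List.foldl_cons, ih]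
    by_cases hk : f kv = k
    · rw [List.filter_cons_of_pos (by simp [hk]), List.foldl_cons]
      congr 1
      simp only [PySem.Dict.modify]
      rw [PySem.Dict.getD_insert, if_pos hk.symm, hk]
    · rw [List.filter_cons_of_neg (by simp [hk])]
      congr 1
      simp only [PySem.Dict.modify]
      rw [PySem.Dict.getD_insert, if_neg (fun h => hk h.symm)]

theorem pv_group_values {κ : Type} [BEq κ] [LawfulBEq κ] [DecidableEq κ]
    (f : (String × PySem.Set String) → κ) (l : List (String × PySem.Set String)) :
    (l.foldl (fun D kv => D.modify (f kv) PySem.Set.empty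
        (fun s => PySem.Set.update s kv.2)) PySem.Dict.empty).values
    = (PySem.Set.ofList (l.map f)).map (fun k =>
        (l.filter (fun kv => f kv == k)).foldl (fun s kv => PySem.Set.update s kv.2)
          PySem.Set.empty) := by
  have hkeys : (l.foldl (fun D kv => D.modify (f kv) PySem.Set.empty
      (fun s => PySem.Set.update s kv.2)) PySem.Dict.empty).keys = PySem.Set.ofList (l.map f) := by
    have := PySem.Dict.keys_foldl_modify_key l f PySem.Set.empty
      (fun _ kv s => PySem.Set.update s kv.2) PySem.Dict.empty
    simpa [PySem.Dict.empty, PySem.Dict.keys, PySem.Set.ofList, PySem.Set.update] using this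
  have hnd : (l.foldl (fun D kv => D.modify (f kv) PySem.Set.empty
      (fun s => PySem.Set.update s kv.2)) PySem.Dict.empty).keys.Nodup :=
    PySem.Dict.nodup_keys_foldl_modify_key l f PySem.Set.empty
      (fun _ kv s => PySem.Set.update s kv.2) PySem.Dict.empty (by simp [PySem.Dict.keys, PySem.Dict.empty])
  rw [PySem.Dict.values_eq_map_keys _ hnd PySem.Set.empty, hkeys]
  congr 1
  funext k
  rw [pv_group_getD f l PySem.Dict.empty k]
  rfl

-- first-occurrence representatives shared by two key functions with equal kernels
theorem pv_reps {κ1 κ2 : Type} [BEq κ1] [LawfulBEq κ1] [BEq κ2] [LawfulBEq κ2]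
    {α : Type} (l : List α) (f : α → κ1) (g : α → κ2)
    (hker : ∀ x ∈ l, ∀ y ∈ l, (f x = f y ↔ g x = g y)) :
    ∃ reps : List α, (∀ r ∈ reps, r ∈ l) ∧
      PySem.Set.ofList (l.map f) = reps.map f ∧
      PySem.Set.ofList (l.map g) = reps.map g := by
  induction l using List.reverseRecOn with
  | nil => exact ⟨[], by simp, rfl, rfl⟩
  | append_singleton l x ih =>
    obtain ⟨reps, hmem, hf, hg⟩ := ih (fun a ha b hb =>
      hker a (List.mem_append_left _ ha) b (List.mem_append_left _ hb))
    have hoff : PySem.Set.ofList ((l ++ [x]).map f) = PySem.Set.add (PySem.Set.ofList (l.map f)) (f x) := by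
      rw [List.map_append, PySem.Set.ofList, List.foldl_append]
      rfl
    have hofg : PySem.Set.ofList ((l ++ [x]).map g) = PySem.Set.add (PySem.Set.ofList (l.map g)) (g x) := by
      rw [List.map_append, PySem.Set.ofList, List.foldl_append]
      rfl
    have hmx : x ∈ l ++ [x] := List.mem_append_right _ (List.mem_cons_self)
    have hcf_iff : (PySem.Set.contains (reps.map f) (f x) = true) ↔ ∃ r ∈ reps, f x = f r := by
      simp only [PySem.Set.contains, List.any_eq_true, List.contains_eq_any_beq,
        List.any_map, Function.comp, beq_iff_eq]
    have hcg_iff : (PySem.Set.contains (reps.map g) (g x) = true) ↔ ∃ r ∈ reps, g x = g r := by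
      simp only [PySem.Set.contains, List.any_eq_true, List.contains_eq_any_beq,
        List.any_map, Function.comp, beq_iff_eq]
    have hcontiff : (PySem.Set.contains (reps.map f) (f x) = true)
        ↔ (PySem.Set.contains (reps.map g) (g x) = true) := by
      rw [hcf_iff, hcg_iff]
      constructor
      · rintro ⟨r, hr, he⟩
        exact ⟨r, hr, (hker x hmx r (List.mem_append_left _ (hmem r hr))).mp he⟩
      · rintro ⟨r, hr, he⟩
        exact ⟨r, hr, (hker x hmx r (List.mem_append_left _ (hmem r hr))).mpr he⟩
    by_cases hcf : PySem.Set.contains (reps.map f) (f x) = true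
    · refine ⟨reps, fun r hr => List.mem_append_left _ (hmem r hr), ?_, ?_⟩
      · rw [hoff, hf, PySem.Set.add, if_pos hcf]
      · rw [hofg, hg, PySem.Set.add, if_pos (hcontiff.mp hcf)]
    · refine ⟨reps ++ [x], ?_, ?_, ?_⟩
      · intro r hr
        rcases List.mem_append.mp hr with hr | hr
        · exact List.mem_append_left _ (hmem r hr)
        · simp at hr; subst hr; exact hmx
      · rw [hoff, hf, PySem.Set.add, if_neg hcf, List.map_append]; rfl
      · rw [hofg, hg, PySem.Set.add, if_neg (fun h => hcf (hcontiff.mpr h)), List.map_append]; rfl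
-- ===== VERDICT (by name: the statement is the Claim_ definition above) =====
def pvPF (sm : List (String × List (String × List String))) : PySem.Dict String String :=
  (pvNti sm).values.foldl (fun p ids => (ids.drop 1).foldl
      (fun p o => pvUnionA p (PySem.List.pyGetD ids 0 "") o) p)
    (pvParent0 (pvIdn sm).keys)

def pvLF (sm : List (String × List (String × List String))) : PySem.Dict String Int :=
  (pvNti sm).values.foldl (fun lab ids => (ids.drop 1).foldl
      (pvLabStep (lab.getD (PySem.List.pyGetD ids 0 "") 0)) lab)
    (pvLabel0 (pvIdn sm).keys)

theorem pv_mem_contains0 (ks : List String) (hnd : ks.Nodup) (x : String) (hx : x ∈ ks) :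
    (pvParent0 ks).contains x = true := by
  rw [pv_parent0_contains ks hnd, List.any_eq_true]
  exact ⟨x, hx, by simp⟩

theorem pv_final_inv (sm : List (String × List (String × List String))) :
    pvInv (pvPF sm) (pvLF sm) ∧
    (∀ x, (pvPF sm).contains x = (pvParent0 (pvIdn sm).keys).contains x) := by
  have hnd := pv_nodup_keys_idn sm
  refine pv_outer_merge (pvNti sm).values (pvParent0 (pvIdn sm).keys)
    (pvLabel0 (pvIdn sm).keys) (pv_inv0 _ hnd) ?_
  intro s hs
  refine ⟨pv_nti_vals_nonempty sm s hs, ?_⟩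
  intro i hi
  have hc := pv_nti_vals_mem sm s hs i hi
  exact pv_mem_contains0 _ hnd i ((PySem.Dict.contains_iff_mem_keys _ _).mp hc)

theorem pv_contains_PF (sm : List (String × List (String × List String))) (x : String)
    (hx : x ∈ (pvIdn sm).keys) : (pvPF sm).contains x = true := by
  rw [(pv_final_inv sm).2 x]
  exact pv_mem_contains0 _ (pv_nodup_keys_idn sm) x hx

theorem pv_portA_norm (sm : List (String × List (String × List String))) :
    create_ground_truth_synonym_clusters sm =
      ((pvIdn sm).items.foldl (fun D kv => D.modify
          (pvRoot ((pvNti sm).values.foldl (fun p ids => (ids.drop 1).foldl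
              (fun p o => pvUnionA p (PySem.List.pyGetD ids 0 "") o) p)
            (pvParent0 (pvIdn sm).keys)) kv.1)
          PySem.Set.empty (fun s => PySem.Set.update s kv.2)) PySem.Dict.empty).values.map
        (fun names => PySem.List.sorted names (fun x => x) false) := by
  simp only [create_ground_truth_synonym_clusters]
  rw [pv_maps_fst, pv_maps_snd]
  have hbody : (fun (p : PySem.Dict String String) (kv : String × PySem.Set String) =>
      (PySem.List.pyRange 1 (PySem.List.len kv.2) 1).foldl
        (fun p i => pvUnionA p (PySem.List.pyGetD kv.2 0 "") (PySem.List.pyGetD kv.2 i "")) p)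
      = (fun p kv => (kv.2.drop 1).foldl (fun p o => pvUnionA p (PySem.List.pyGetD kv.2 0 "") o) p) := by
    funext p kv
    have := PySem.List.foldl_pyRange_pyGetD kv.2 ""
      (fun acc o => pvUnionA acc (PySem.List.pyGetD kv.2 0 "") o) p (a := 1) (by norm_num)
    simpa using this
  rw [hbody]
  rw [show List.foldl (fun (p : PySem.Dict String String) i => p.insert i i) PySem.Dict.empty
      (pvIdn sm).keys = pvParent0 (pvIdn sm).keys from rfl]
  rw [show ((pvNti sm).items.foldl (fun p kv => (kv.2.drop 1).foldl
        (fun p o => pvUnionA p (PySem.List.pyGetD kv.2 0 "") o) p) (pvParent0 (pvIdn sm).keys))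
      = ((pvNti sm).values.foldl (fun p ids => (ids.drop 1).foldl
        (fun p o => pvUnionA p (PySem.List.pyGetD ids 0 "") o) p) (pvParent0 (pvIdn sm).keys)) by
    rw [show (pvNti sm).values = (pvNti sm).items.map (·.2) from rfl, List.foldl_map]]
  rw [show (List.foldl
        (fun p ids => List.foldl (fun p o => pvUnionA p (PySem.List.pyGetD ids 0 "") o) p (List.drop 1 ids))
        (pvParent0 (pvIdn sm).keys) (pvNti sm).values) = pvPF sm from rfl]
  rw [pv_phase3_aux (pvIdn sm).items (pvPF sm) PySem.Dict.empty
    (fun y => pvRoot (pvPF sm) y) (pv_final_inv sm).1.2.1 ?_ (fun y => rfl)]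
  intro kv hkv
  exact pv_contains_PF sm kv.1 (List.mem_map_of_mem hkv)

theorem pv_portB_norm (sm : List (String × List (String × List String))) :
    create_ground_truth_synonym_clusters_alt sm =
      ((pvIdn sm).items.foldl (fun D kv => D.modify ((pvLF sm).getD kv.1 0)
          PySem.Set.empty (fun s => PySem.Set.update s kv.2)) PySem.Dict.empty).values.map
        (fun names => PySem.List.sorted names (fun x => x) false) := by
  simp only [create_ground_truth_synonym_clusters_alt]
  have hbodyB : (fun (lab0 : PySem.Dict String Int) (ids : PySem.Set String) =>
      (PySem.List.slice ids (some 1) none).foldl (fun lab other =>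
        if lab.getD other 0 ≠ lab0.getD (PySem.List.pyGetD ids 0 "") 0 then
          PySem.Dict.mk (lab.items.map (fun kv =>
            if kv.2 = lab.getD other 0 then (kv.1, lab0.getD (PySem.List.pyGetD ids 0 "") 0) else kv))
        else lab) lab0)
      = (fun lab ids => (ids.drop 1).foldl
          (pvLabStep (lab.getD (PySem.List.pyGetD ids 0 "") 0)) lab) := by
    funext lab0 ids
    have hs : PySem.List.slice ids (some 1) none = List.drop 1 ids := by simp [pysem]
    rw [hs]
    rfl
  rw [hbodyB]
  rfl

theorem create_ground_truth_synonym_clusters_spec : Claim_equal_create_ground_truth_synonym_clusters := by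
  intro sm _
  unfold Spec_create_ground_truth_synonym_clusters
  rw [pv_portA_norm, pv_portB_norm]
  rw [show (List.foldl (fun p ids => List.foldl
      (fun p o => pvUnionA p (PySem.List.pyGetD ids 0 "") o) p (List.drop 1 ids))
      (pvParent0 (pvIdn sm).keys) (pvNti sm).values) = pvPF sm from rfl]
  obtain ⟨⟨hct, hwf, hker'⟩, hcpres⟩ := pv_final_inv sm
  have hker : ∀ kv ∈ (pvIdn sm).items, ∀ kv' ∈ (pvIdn sm).items,
      (pvRoot (pvPF sm) kv.1 = pvRoot (pvPF sm) kv'.1 ↔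
        (pvLF sm).getD kv.1 0 = (pvLF sm).getD kv'.1 0) := by
    intro kv hkv kv' hkv'
    have hc1 : (pvPF sm).contains kv.1 = true := pv_contains_PF sm kv.1 (List.mem_map_of_mem hkv)
    have hc2 : (pvPF sm).contains kv'.1 = true := pv_contains_PF sm kv'.1 (List.mem_map_of_mem hkv')
    obtain ⟨v1, hv1⟩ := pv_get?_of_contains (pvLF sm) kv.1 (by rw [← hct]; exact hc1)
    obtain ⟨v2, hv2⟩ := pv_get?_of_contains (pvLF sm) kv'.1 (by rw [← hct]; exact hc2)
    rw [hker' kv.1 kv'.1 hc1 hc2, hv1, hv2, Option.some_inj,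
      PySem.Dict.getD, PySem.Dict.getD, hv1, hv2]
    rfl
  obtain ⟨reps, hrmem, hrf, hrg⟩ := pv_reps (pvIdn sm).items
    (fun kv => pvRoot (pvPF sm) kv.1) (fun kv => (pvLF sm).getD kv.1 0) hker
  rw [pv_group_values (fun kv => pvRoot (pvPF sm) kv.1) (pvIdn sm).items,
    pv_group_values (fun kv => (pvLF sm).getD kv.1 0) (pvIdn sm).items,
    hrf, hrg, List.map_map, List.map_map, List.map_map, List.map_map]
  apply List.map_congr_left
  intro r hr
  have hpt : ∀ kv ∈ (pvIdn sm).items,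
      (pvRoot (pvPF sm) kv.1 == pvRoot (pvPF sm) r.1)
        = ((pvLF sm).getD kv.1 0 == (pvLF sm).getD r.1 0) := by
    intro kv hkv
    by_cases h : pvRoot (pvPF sm) kv.1 = pvRoot (pvPF sm) r.1
    · simp [h, (hker kv hkv r (hrmem r hr)).mp h]
    · have h2 : ¬ (pvLF sm).getD kv.1 0 = (pvLF sm).getD r.1 0 :=
        fun hgr => h ((hker kv hkv r (hrmem r hr)).mpr hgr)
      simp [h, h2]
  simp only [Function.comp]
  exact congrArg (fun names => PySem.List.sorted names (fun x => x) false)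
    (congrArg (List.foldl (fun s kv => PySem.Set.update s kv.2) PySem.Set.empty)
      (List.filter_congr hpt))
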